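-- pv_equiv track=rewrite | github.com/Rostlab/ProNA2020 | prona2019Mod/lib_parser.py | parse_profbval
-- ===== SOURCE A (Python) =====
-- class ParseError(Exception): pass		#To indicate a parsing error
--
-- class EmptyError(Exception): pass		#To indicate empty data passed to the parser
--
-- def parse_profbval(d_bval):
-- 	"""
-- 	Returns a dictionary with keys and values as follows:
--
-- 	'prd_raw1': list of integers corresponding to first output node
-- 	'prd_raw2': list of integers corresponding to second output node
--
-- 	Unfortunately, there is neither sequence information nor a binary prediction to be found in the output.
-- 	"""
-- 	if d_bval == '':
-- 		raise EmptyError('Empty bval file!')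
--
-- 	out1 = []
-- 	out2 = []
-- 	region_of_interest = False
-- 	for line in d_bval.split('\n'):
-- 		if region_of_interest:
-- 			tokens = line.split()
-- 			if len(tokens) == 0: continue
-- 			out1.append( int(tokens[1]) )
-- 			out2.append( int(tokens[2]) )
--
-- 		if line.startswith('* out vec:'):
-- 			region_of_interest = True
--
-- 	#Consistency check
-- 	if len(out1) != len(out2):
-- 		raise ParseError("Something happened! profbval returns different column lengths!")
--
-- 	return {'prd_raw1':out1, 'prd_raw2':out2}
-- ===== SOURCE B (Python) =====
-- class ParseError(Exception): pass		#To indicate a parsing error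
--
-- class EmptyError(Exception): pass		#To indicate empty data passed to the parser
--
-- def parse_profbval(d_bval):
-- 	"""
-- 	Text-level reimplementation: locate the first marker line by substring search
-- 	on the raw text ('* out vec:' at position 0 or right after a newline), slice
-- 	the text after that line's newline, and parse the data columns declaratively.
-- 	"""
-- 	if d_bval == '':
-- 		raise EmptyError('Empty bval file!')
--
-- 	if d_bval.startswith('* out vec:'):
-- 		pos = 0
-- 	else:
-- 		pos = d_bval.find('\n* out vec:')
-- 		if pos >= 0:
-- 			pos += 1
--
-- 	if pos < 0:
-- 		rows = []
-- 	else: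
-- 		nl = d_bval.find('\n', pos)
-- 		rows = [] if nl < 0 else [l.split() for l in d_bval[nl + 1:].split('\n')]
--
-- 	out1 = [int(r[1]) for r in rows if r]
-- 	out2 = [int(r[2]) for r in rows if r]
--
-- 	if len(out1) != len(out2):
-- 		raise ParseError("Something happened! profbval returns different column lengths!")
--
-- 	return {'prd_raw1': out1, 'prd_raw2': out2}
-- ===== Notes on version B (the rewrite author's own statement) =====
-- stated objective: alternative
-- what changed: B locates the marker by substring search on the raw text ('* out vec:' at position 0 or right after a newline, via str.find), slices the text after that line's newline, and parses the slice declaratively (split per line, then two column comprehensions), instead of A's stateful line-by-line loop with a region_of_interest flag and two appended accumulators.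
import Mathlib
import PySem

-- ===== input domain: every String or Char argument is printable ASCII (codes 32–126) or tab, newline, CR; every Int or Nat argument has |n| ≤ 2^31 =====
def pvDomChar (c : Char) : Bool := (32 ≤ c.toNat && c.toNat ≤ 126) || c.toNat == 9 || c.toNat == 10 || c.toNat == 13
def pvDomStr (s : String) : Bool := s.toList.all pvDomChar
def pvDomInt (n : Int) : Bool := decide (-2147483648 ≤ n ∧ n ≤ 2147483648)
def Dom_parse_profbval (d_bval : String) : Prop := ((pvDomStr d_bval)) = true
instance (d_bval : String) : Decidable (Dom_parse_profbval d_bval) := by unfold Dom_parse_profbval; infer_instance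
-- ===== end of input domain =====

-- B replaces A's stateful flag-and-accumulators line loop by a text-level substring
-- search for the marker, a slice of the text after the marker line, and a declarative
-- per-column parse of the slice (objective: an alternative algorithm, same cost).

-- ===== PORT A =====
-- one loop step of A: parse the line if the flag is set, then update the flag
def pvStepA (st : List Int × List Int × Bool) (line : String) : List Int × List Int × Bool :=
  let p : List Int × List Int :=
    if st.2.2 then
      let tokens := PySem.Str.split₀ line
      if tokens.length = 0 then (st.1, st.2.1)
      else (st.1 ++ [(PySem.Int.ofStr? (tokens.getD 1 "")).getD 0],
            st.2.1 ++ [(PySem.Int.ofStr? (tokens.getD 2 "")).getD 0])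
    else (st.1, st.2.1)
  (p.1, p.2, if PySem.Str.startswith line "* out vec:" then true else st.2.2)

def parse_profbval (d_bval : String) : List (String × List Int) :=
  let lines : List String := (PySem.Str.split? d_bval "\n").getD []   -- sep ≠ "", so split? is always some
  let st := lines.foldl pvStepA ([], [], false)
  [("prd_raw1", st.1), ("prd_raw2", st.2.1)]

-- ===== PORT B =====
-- B's marker location + slice: the lines strictly after the first marker line,
-- found by substring search on the raw text
def pvLinesB (d_bval : String) : List String :=
  let pos : Int :=
    if PySem.Str.startswith d_bval "* out vec:" then 0
    else
      let f := PySem.Str.find d_bval "\n* out vec:"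
      if 0 ≤ f then f + 1 else f
  if pos < 0 then []
  else
    let nl := PySem.Str.findFrom d_bval "\n" pos
    if nl < 0 then []
    else (PySem.Str.split? (PySem.Str.slice d_bval (some (nl + 1)) none) "\n").getD []

def parse_profbval_alt (d_bval : String) : List (String × List Int) :=
  let rows : List (List String) := (pvLinesB d_bval).map PySem.Str.split₀
  let out1 := (rows.filter (fun r => !r.isEmpty)).map
    (fun r => (PySem.Int.ofStr? (r.getD 1 "")).getD 0)
  let out2 := (rows.filter (fun r => !r.isEmpty)).map
    (fun r => (PySem.Int.ofStr? (r.getD 2 "")).getD 0)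
  [("prd_raw1", out1), ("prd_raw2", out2)]

-- ===== PRECONDITION & SPEC =====
-- Pre_ excludes exactly the inputs on which Python A raises: the empty string
-- (EmptyError) and inputs where some nonempty line after the first marker line has
-- fewer than 3 whitespace tokens (IndexError) or a non-integer second/third token (ValueError).
def pvGoodLine (line : String) : Bool :=
  PySem.Str.split₀ line = [] ||
    (3 ≤ (PySem.Str.split₀ line).length &&
     (PySem.Int.ofStr? ((PySem.Str.split₀ line).getD 1 "")).isSome &&
     (PySem.Int.ofStr? ((PySem.Str.split₀ line).getD 2 "")).isSome)

def Pre_parse_profbval (d_bval : String) : Prop :=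
  d_bval ≠ "" ∧
  ∀ line ∈ ((((PySem.Str.split? d_bval "\n").getD []).dropWhile
      (fun l => !PySem.Str.startswith l "* out vec:")).drop 1), pvGoodLine line = true

instance (d_bval : String) : Decidable (Pre_parse_profbval d_bval) := by
  unfold Pre_parse_profbval; infer_instance

def pvWitness_parse_profbval : String := "* out vec:\n1 2 3\n 4 -5 +6 "

def Spec_parse_profbval (d_bval : String) (out : List (String × List Int)) : Prop := out = parse_profbval_alt d_bval
instance (d_bval : String) (out : List (String × List Int)) : Decidable (Spec_parse_profbval d_bval out) := by unfold Spec_parse_profbval; infer_instance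

-- ===== CLAIM (what is proved, stated in full; the proofs are below) =====
def Claim_equal_parse_profbval : Prop := ∀ (d_bval : String), Dom_parse_profbval d_bval → Pre_parse_profbval d_bval → Spec_parse_profbval d_bval (parse_profbval d_bval)

-- ===== LEMMAS AND PROOFS =====
def pvM : List Char := "* out vec:".toList
def pvStepP (st : List Int × List Int) (line : String) : List Int × List Int :=
  let tokens := PySem.Str.split₀ line
  if tokens.length = 0 then st
  else (st.1 ++ [(PySem.Int.ofStr? (tokens.getD 1 "")).getD 0],
        st.2 ++ [(PySem.Int.ofStr? (tokens.getD 2 "")).getD 0])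
theorem pvPairFold (ls : List String) (a b : List Int) :
    ls.foldl pvStepP (a, b) =
      (a ++ (((ls.map PySem.Str.split₀).filter (fun r => !r.isEmpty)).map
         (fun r => (PySem.Int.ofStr? (r.getD 1 "")).getD 0)),
       b ++ (((ls.map PySem.Str.split₀).filter (fun r => !r.isEmpty)).map
         (fun r => (PySem.Int.ofStr? (r.getD 2 "")).getD 0))) := by
  induction ls generalizing a b with
  | nil => simp
  | cons l ls ih =>
    simp only [List.foldl_cons, pvStepP, List.map_cons, List.filter_cons]
    rcases h : PySem.Str.split₀ l with _ | ⟨t, ts⟩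
    · simp [ih]
    · simp [ih, List.append_assoc]

-- once the flag is true, A's loop is the pair fold (and the flag stays true)
theorem pvFold_true (ls : List String) (o1 o2 : List Int) :
    ls.foldl pvStepA (o1, o2, true) =
      ((ls.foldl pvStepP (o1, o2)).1, (ls.foldl pvStepP (o1, o2)).2, true) := by
  induction ls generalizing o1 o2 with
  | nil => rfl
  | cons l ls ih =>
    simp only [List.foldl_cons, pvStepA, pvStepP]
    rcases h : PySem.Str.split₀ l with _ | ⟨t, ts⟩ <;>
      simp [ih, ite_self]

-- A's whole loop, characterised by the first-marker decomposition
theorem pvFold_main (ls : List String) :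
    ls.foldl pvStepA ([], [], false) =
      (let rest := (ls.dropWhile (fun l => !PySem.Str.startswith l "* out vec:")).drop 1
       ((rest.foldl pvStepP ([], [])).1, (rest.foldl pvStepP ([], [])).2,
        !(ls.dropWhile (fun l => !PySem.Str.startswith l "* out vec:")).isEmpty)) := by
  induction ls with
  | nil => rfl
  | cons l ls ih =>
    by_cases h : PySem.Str.startswith l "* out vec:" = true
    · have hstep : pvStepA ([], [], false) l = ([], [], true) := by
        simp only [pvStepA]; rw [h]; rfl
      rw [List.foldl_cons, hstep, pvFold_true, List.dropWhile_cons, h]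
      simp
    · have h' : PySem.Str.startswith l "* out vec:" = false := by
        exact Bool.not_eq_true _ ▸ (by simpa using h)
      have hstep : pvStepA ([], [], false) l = ([], [], false) := by
        simp only [pvStepA]; rw [h']; rfl
      rw [List.foldl_cons, hstep, ih, List.dropWhile_cons, h']
      simp

def pvMySplit : List Char → List Char → List (List Char)
  | cur, [] => [cur.reverse]
  | cur, c :: r => if c = '\n' then cur.reverse :: pvMySplit [] r else pvMySplit (c :: cur) r

theorem pvGoSpec (l : List Char) (fuel : Nat) (cur : List Char) (acc : List (List Char))
    (h : l.length ≤ fuel) :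
    PySem.Chars.splitOn.go ['\n'] fuel l cur acc = acc.reverse ++ pvMySplit cur l := by
  induction fuel generalizing l cur acc with
  | zero =>
    have : l = [] := List.length_eq_zero_iff.mp (Nat.le_zero.mp h)
    subst this
    simp [PySem.Chars.splitOn.go, pvMySplit]
  | succ f ih =>
    cases l with
    | nil => simp [PySem.Chars.splitOn.go, pvMySplit]
    | cons c rest =>
      rw [PySem.Chars.splitOn.go]
      by_cases hc : c = '\n'
      · subst hc
        have hp : List.isPrefixOf ['\n'] ('\n' :: rest) = true := by
          simp [List.isPrefixOf]
        simp only [hp, if_true]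
        rw [ih _ _ _ (by simpa using Nat.le_of_succ_le_succ h)]
        simp [pvMySplit]
      · have hp : List.isPrefixOf ['\n'] (c :: rest) = false := by
          simp [List.isPrefixOf]
          intro hh; exact absurd hh.symm hc
        simp only [hp]
        rw [show pvMySplit cur (c :: rest) = pvMySplit (c :: cur) rest from by
          rw [pvMySplit, if_neg hc]]
        exact ih _ _ _ (by simpa using Nat.le_of_succ_le_succ h)

theorem pvSplitOn_eq (cs : List Char) :
    PySem.Chars.splitOn cs ['\n'] = pvMySplit [] cs := by
  rw [PySem.Chars.splitOn, pvGoSpec _ _ _ _ (Nat.le_succ _)]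
  simp

theorem pvMySplit_no_nl (l : List Char) (h : '\n' ∉ l) (cur : List Char) :
    pvMySplit cur l = [cur.reverse ++ l] := by
  induction l generalizing cur with
  | nil => simp [pvMySplit]
  | cons c r ih =>
    have hc : c ≠ '\n' := fun hh => h (hh ▸ List.mem_cons_self)
    rw [pvMySplit, if_neg hc, ih (fun hm => h (List.mem_cons_of_mem _ hm))]
    simp

theorem pvMySplit_append (l r : List Char) (h : '\n' ∉ l) (cur : List Char) :
    pvMySplit cur (l ++ '\n' :: r) = (cur.reverse ++ l) :: pvMySplit [] r := by
  induction l generalizing cur with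
  | nil => simp [pvMySplit]
  | cons c t ih =>
    have hc : c ≠ '\n' := fun hh => h (hh ▸ List.mem_cons_self)
    rw [List.cons_append, pvMySplit, if_neg hc, ih (fun hm => h (List.mem_cons_of_mem _ hm))]
    simp

theorem pvMarkerPrefix (l r : List Char) (_h : '\n' ∉ l) :
    pvM <+: (l ++ '\n' :: r) ↔ pvM <+: l := by
  constructor
  · intro hp
    by_cases hlen : pvM.length ≤ l.length
    · rw [List.prefix_iff_eq_take] at hp ⊢
      conv_lhs => rw [hp, List.take_append_of_le_length hlen]
    · exfalso
      have hl : l.length < pvM.length := by omega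
      have hlen2 : l.length < (l ++ '\n' :: r).length := by simp
      have := hp.getElem (i := l.length) hl
      have h2 : (l ++ '\n' :: r)[l.length]'hlen2 = '\n' := by
        rw [List.getElem_append_right (Nat.le_refl l.length)]
        simp
      have h3 : pvM[l.length]'hl = '\n' := by rw [this]; exact h2
      have : '\n' ∈ pvM := h3 ▸ List.getElem_mem hl
      revert this; decide
  · intro hp
    exact hp.trans (List.prefix_append l ('\n' :: r))

theorem pvDropAppend (l r : List Char) (c : Char) (j : Nat) (h : l.length < j) :
    (l ++ c :: r).drop j = r.drop (j - l.length - 1) := by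
  have h1 : (l ++ c :: r).drop j = ((l ++ [c]) ++ r).drop ((l ++ [c]).length + (j - l.length - 1)) := by
    simp; omega
  rw [h1, ← List.drop_drop, List.drop_left]

theorem pvPrefixNlLt (l r p : List Char) (hl : '\n' ∉ l) (j : Nat) (hj : j < l.length) :
    ¬ ('\n' :: p) <+: (l ++ '\n' :: r).drop j := by
  intro hp
  rw [List.drop_append_of_le_length (Nat.le_of_lt hj)] at hp
  cases hdrop : l.drop j with
  | nil => have := List.length_drop (l := l) (i := j); rw [hdrop] at this; simp at this; omega
  | cons a t =>
    rw [hdrop] at hp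
    obtain ⟨u, hu⟩ := hp
    simp only [List.cons_append] at hu
    have ha : a = '\n' := by
      have := congrArg (·.head?) hu.symm; simpa using this
    exact hl (List.mem_of_mem_drop (by rw [hdrop, ha]; exact List.mem_cons_self))

theorem pvFindEq (cs sub : List Char) (i : Nat)
    (h1 : sub <+: cs.drop i) (h2 : ∀ j < i, ¬ sub <+: cs.drop j) :
    PySem.Chars.find cs sub = (i : Int) := by
  have hinf : sub <:+: cs := List.infix_iff_prefix_suffix.mpr ⟨cs.drop i, h1, List.drop_suffix i cs⟩
  have h0 : 0 ≤ PySem.Chars.find cs sub := (PySem.Chars.find_nonneg_iff cs sub).mpr hinf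
  obtain ⟨hpre, hmin⟩ := PySem.Chars.find_spec h0
  have hk : (PySem.Chars.find cs sub).toNat = i := by
    rcases Nat.lt_trichotomy (PySem.Chars.find cs sub).toNat i with h | h | h
    · exact absurd hpre (h2 _ h)
    · exact h
    · exact absurd h1 (hmin _ h)
  omega

theorem pvFindNone (cs sub : List Char) (h : ∀ j, ¬ sub <+: cs.drop j) :
    PySem.Chars.find cs sub = -1 := by
  rw [PySem.Chars.find_eq_neg_one_iff]
  intro hinf
  obtain ⟨j, hj⟩ := (PySem.Chars.exists_prefix_drop_iff_isIn sub cs).mpr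
    ((PySem.Chars.isIn_iff_infix sub cs).mpr hinf)
  exact h j hj

theorem pvConsPrefixDrop (cs : List Char) (p : List Char) (j : Nat)
    (hp : ('\n' :: p) <+: cs.drop j) : '\n' ∈ cs := by
  obtain ⟨u, hu⟩ := hp
  exact List.mem_of_mem_drop (l := cs) (i := j) (by rw [← hu]; exact List.mem_cons_self)

theorem pvFindNl_none (cs : List Char) (h : '\n' ∉ cs) :
    PySem.Chars.find cs ['\n'] = -1 := by
  exact pvFindNone _ _ (fun j hp => h (pvConsPrefixDrop cs [] j hp))

theorem pvFindMk_none' (cs p : List Char) (h : '\n' ∉ cs) :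
    PySem.Chars.find cs ('\n' :: p) = -1 := by
  exact pvFindNone _ _ (fun j hp => h (pvConsPrefixDrop cs p j hp))

theorem pvFindNl (l r : List Char) (h : '\n' ∉ l) :
    PySem.Chars.find (l ++ '\n' :: r) ['\n'] = (l.length : Int) := by
  apply pvFindEq
  · rw [List.drop_left]; exact ⟨r, rfl⟩
  · exact fun j hj => pvPrefixNlLt l r [] h j hj

theorem pvFindMk' (l r p : List Char) (h : '\n' ∉ l) :
    PySem.Chars.find (l ++ '\n' :: r) ('\n' :: p) =
      (if p <+: r then (l.length : Int)
       else if PySem.Chars.find r ('\n' :: p) = -1 then -1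
       else (l.length : Int) + 1 + PySem.Chars.find r ('\n' :: p)) := by
  by_cases hM : p <+: r
  · rw [if_pos hM]
    apply pvFindEq
    · rw [List.drop_left, List.cons_prefix_cons]; exact ⟨rfl, hM⟩
    · exact fun j hj => pvPrefixNlLt l r p h j hj
  · rw [if_neg hM]
    by_cases hfr : PySem.Chars.find r ('\n' :: p) = -1
    · rw [if_pos hfr]
      apply pvFindNone
      intro j hp
      rcases Nat.lt_trichotomy j l.length with hj | hj | hj
      · exact pvPrefixNlLt l r p h j hj hp
      · subst hj
        rw [List.drop_left, List.cons_prefix_cons] at hp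
        exact hM hp.2
      · rw [pvDropAppend l r '\n' j hj] at hp
        have hinf : ('\n' :: p) <:+: r :=
          List.infix_iff_prefix_suffix.mpr ⟨_, hp, List.drop_suffix _ r⟩
        rw [PySem.Chars.find_eq_neg_one_iff] at hfr
        exact hfr hinf
    · rw [if_neg hfr]
      have h0 : 0 ≤ PySem.Chars.find r ('\n' :: p) := by
        have := PySem.Chars.neg_one_le_find r ('\n' :: p); omega
      obtain ⟨hpre, hmin⟩ := PySem.Chars.find_spec h0
      set k := (PySem.Chars.find r ('\n' :: p)).toNat with hkdef
      have hfind : PySem.Chars.find (l ++ '\n' :: r) ('\n' :: p) = ((l.length + 1 + k : Nat) : Int) := by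
        apply pvFindEq
        · rw [pvDropAppend l r '\n' _ (by omega)]
          have : l.length + 1 + k - l.length - 1 = k := by omega
          rw [this]; exact hpre
        · intro j hj
          rcases Nat.lt_trichotomy j l.length with hj2 | hj2 | hj2
          · exact pvPrefixNlLt l r p h j hj2
          · subst hj2
            rw [List.drop_left, List.cons_prefix_cons]
            rintro ⟨-, hp2⟩; exact hM hp2
          · rw [pvDropAppend l r '\n' j hj2]
            exact hmin _ (by omega)
      rw [hfind]; push_cast; omega

def pvLB (cs : List Char) : List (List Char) :=
  let pos : Int :=
    if PySem.Chars.startswith cs pvM then 0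
    else
      let f := PySem.Chars.find cs ('\n' :: pvM)
      if 0 ≤ f then f + 1 else f
  if pos < 0 then []
  else
    let nl := PySem.Chars.findFrom cs ['\n'] pos
    if nl < 0 then []
    else pvMySplit [] (cs.drop (nl + 1).toNat)

def pvRA (cs : List Char) : List (List Char) :=
  ((pvMySplit [] cs).dropWhile (fun l => !PySem.Chars.startswith l pvM)).drop 1

theorem pvMainAux : ∀ n : Nat, ∀ cs : List Char, cs.length ≤ n → pvLB cs = pvRA cs := by
  intro n
  induction n with
  | zero =>
    intro cs hlen
    have : cs = [] := List.length_eq_zero_iff.mp (Nat.le_zero.mp hlen)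
    subst this; decide
  | succ n ih =>
    intro cs hlen
    by_cases hmem : '\n' ∈ cs
    · -- decompose cs = l ++ '\n' :: r with '\n' ∉ l
      set l := cs.takeWhile (fun c => c != '\n') with hl
      have hnl : '\n' ∉ l := by
        intro hm
        have := List.mem_takeWhile_imp hm
        simp at this
      have hdw : cs.dropWhile (fun c => c != '\n') ≠ [] := by
        intro hempty
        have : cs = l := by
          conv_lhs => rw [← List.takeWhile_append_dropWhile (p := fun c => c != '\n') (l := cs)]
          rw [hempty]; exact List.append_nil l ▸ hl.symm ▸ rfl
        exact hnl (this ▸ hmem)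
      obtain ⟨c, t, hct⟩ : ∃ c t, cs.dropWhile (fun c => c != '\n') = c :: t := by
        cases h : cs.dropWhile (fun c => c != '\n') with
        | nil => exact absurd h hdw
        | cons c t => exact ⟨c, t, rfl⟩
      have hc : c = '\n' := by
        have h1 := List.head_dropWhile_not (fun c => c != '\n') hdw
        have h2 : (cs.dropWhile (fun c => c != '\n')).head hdw = c := by
          simp [hct]
        rw [h2] at h1
        simpa using h1
      set r := t with hr
      have hcs : cs = l ++ '\n' :: r := by
        conv_lhs => rw [← List.takeWhile_append_dropWhile (p := fun c => c != '\n') (l := cs)]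
        rw [hct, hc]
      have hlenr : l.length + 1 + r.length = cs.length := by
        rw [hcs]; simp; omega
      have hrle : r.length ≤ n := by omega
      have ihr := ih r hrle
      -- the split of cs
      have hsplit : pvMySplit [] cs = l :: pvMySplit [] r := by
        rw [hcs, pvMySplit_append l r hnl []]; rfl
      by_cases hst : pvM <+: l
      · -- marker on the first line
        have hstcs : PySem.Chars.startswith cs pvM = true := by
          rw [PySem.Chars.startswith_iff, hcs, pvMarkerPrefix l r hnl]; exact hst
        have hstl : PySem.Chars.startswith l pvM = true := (PySem.Chars.startswith_iff l pvM).mpr hst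
        have hRA : pvRA cs = pvMySplit [] r := by
          rw [pvRA, hsplit, List.dropWhile_cons]
          simp [hstl]
        rw [hRA, pvLB]
        simp only [hstcs, if_true]
        rw [if_neg (by omega : ¬ (0:Int) < 0)]
        rw [show PySem.Chars.findFrom cs ['\n'] 0 = PySem.Chars.find cs ['\n'] from
          PySem.Chars.findFrom_zero cs ['\n']]
        rw [hcs, pvFindNl l r hnl]
        rw [if_neg (by omega : ¬ (l.length : Int) < 0)]
        have : ((l.length : Int) + 1).toNat = l.length + 1 := by omega
        rw [this, pvDropAppend l r '\n' (l.length + 1) (by omega)]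
        simp
      · -- no marker on the first line: recurse on r
        have hstcs : PySem.Chars.startswith cs pvM = false := by
          rw [Bool.eq_false_iff, Ne, PySem.Chars.startswith_iff, hcs, pvMarkerPrefix l r hnl]
          exact hst
        have hstl : PySem.Chars.startswith l pvM = false := by
          rw [Bool.eq_false_iff, Ne, PySem.Chars.startswith_iff]; exact hst
        have hRA : pvRA cs = pvRA r := by
          rw [pvRA, hsplit, List.dropWhile_cons]
          simp [hstl, pvRA]
        rw [hRA, ← ihr]
        rw [pvLB, pvLB]
        simp only [hstcs, Bool.false_eq_true, if_false]
        rw [show PySem.Chars.find cs ('\n' :: pvM) =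
              (if pvM <+: r then (l.length : Int)
               else if PySem.Chars.find r ('\n' :: pvM) = -1 then -1
               else (l.length : Int) + 1 + PySem.Chars.find r ('\n' :: pvM)) from by
          rw [hcs]; exact pvFindMk' l r pvM hnl]
        by_cases hMr : pvM <+: r
        · -- marker is r's first line's start? no: pvM <+: r — r starts with the marker
          have hstr : PySem.Chars.startswith r pvM = true := (PySem.Chars.startswith_iff r pvM).mpr hMr
          rw [if_pos hMr]
          simp only [hstr, if_true]
          rw [if_pos (by omega : (0:Int) ≤ (l.length : Int))]
          rw [if_neg (by omega : ¬ ((l.length : Int) + 1) < 0), if_neg (by omega : ¬ (0:Int) < 0)]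
          rw [show ((l.length : Int) + 1) = ((l.length + 1 : Nat) : Int) from by push_cast; ring]
          rw [PySem.Chars.findFrom_natCast cs ['\n'] (l.length + 1) (by omega)]
          rw [show cs.drop (l.length + 1) = r from by
            rw [hcs, pvDropAppend l r '\n' (l.length + 1) (by omega)]; simp]
          rw [PySem.Chars.findFrom_zero]
          by_cases hfr : PySem.Chars.find r ['\n'] = -1
          · rw [if_pos hfr, hfr]
            norm_num
          · rw [if_neg hfr]
            have h0 : 0 ≤ PySem.Chars.find r ['\n'] := by
              have := PySem.Chars.neg_one_le_find r ['\n']; omega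
            rw [if_neg (by omega : ¬ ((l.length + 1 : Nat) : Int) + PySem.Chars.find r ['\n'] < 0),
                if_neg (by omega : ¬ PySem.Chars.find r ['\n'] < 0)]
            congr 1
            rw [hcs, pvDropAppend l r '\n' _ (by push_cast; omega)]
            congr 1
            push_cast
            omega
        · rw [if_neg hMr]
          have hstr : PySem.Chars.startswith r pvM = false := by
            rw [Bool.eq_false_iff, Ne, PySem.Chars.startswith_iff]; exact hMr
          simp only [hstr, Bool.false_eq_true, if_false]
          by_cases hfr : PySem.Chars.find r ('\n' :: pvM) = -1
          · rw [if_pos hfr, hfr]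
            norm_num
          · rw [if_neg hfr]
            have h0 : 0 ≤ PySem.Chars.find r ('\n' :: pvM) := by
              have := PySem.Chars.neg_one_le_find r ('\n' :: pvM); omega
            set k := PySem.Chars.find r ('\n' :: pvM) with hk
            have hklt : k.toNat < r.length := by
              obtain ⟨hpre, -⟩ := PySem.Chars.find_spec (s := r) (sub := '\n' :: pvM) h0
              rw [← hk] at hpre
              obtain ⟨u, hu⟩ := hpre
              have : (r.drop k.toNat).length ≠ 0 := by rw [← hu]; simp
              simp at this
              omega
            rw [if_pos (by omega : (0:Int) ≤ (l.length : Int) + 1 + k),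
                if_pos (by omega : (0:Int) ≤ k)]
            rw [if_neg (by omega : ¬ ((l.length : Int) + 1 + k + 1) < 0),
                if_neg (by omega : ¬ (k + 1) < 0)]
            rw [show ((l.length : Int) + 1 + k + 1) = ((l.length + 1 + (k.toNat + 1) : Nat) : Int) from by push_cast; omega,
                show (k + 1 : Int) = ((k.toNat + 1 : Nat) : Int) from by push_cast; omega]
            rw [PySem.Chars.findFrom_natCast cs ['\n'] _ (by omega),
                PySem.Chars.findFrom_natCast r ['\n'] _ (by omega)]
            rw [show cs.drop (l.length + 1 + (k.toNat + 1)) = r.drop (k.toNat + 1) from by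
              rw [hcs, pvDropAppend l r '\n' _ (by omega)]
              congr 1; omega]
            by_cases hf2 : PySem.Chars.find (r.drop (k.toNat + 1)) ['\n'] = -1
            · rw [if_pos hf2, if_pos hf2]
              rw [if_pos (by omega : (-1:Int) < 0), if_pos (by omega : (-1:Int) < 0)]
            · rw [if_neg hf2, if_neg hf2]
              have h02 : 0 ≤ PySem.Chars.find (r.drop (k.toNat + 1)) ['\n'] := by
                have := PySem.Chars.neg_one_le_find (r.drop (k.toNat + 1)) ['\n']; omega
              rw [if_neg (by push_cast; omega), if_neg (by push_cast; omega)]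
              congr 1
              rw [hcs, pvDropAppend l r '\n' _ (by push_cast; omega)]
              congr 1
              push_cast
              omega
    · -- no newline at all: both empty
      have hsingle : pvMySplit [] cs = [cs] := pvMySplit_no_nl cs hmem []
      have hRA : pvRA cs = [] := by
        rw [pvRA, hsingle, List.dropWhile_cons]
        by_cases hst : PySem.Chars.startswith cs pvM = true
        · simp [hst]
        · simp [Bool.eq_false_iff.mpr hst]
      rw [hRA, pvLB]
      by_cases hst : PySem.Chars.startswith cs pvM = true
      · simp only [hst, if_true]
        rw [if_neg (by omega : ¬ (0:Int) < 0), PySem.Chars.findFrom_zero, pvFindNl_none cs hmem]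
        rw [if_pos (by omega : (-1:Int) < 0)]
      · simp only [Bool.eq_false_iff.mpr hst, Bool.false_eq_true, if_false]
        rw [pvFindMk_none' cs pvM hmem]
        norm_num

theorem pvMain (cs : List Char) : pvLB cs = pvRA cs := pvMainAux cs.length cs (Nat.le_refl _)

theorem pvSplitLines (s : String) :
    ((PySem.Str.split? s "\n").getD []).map String.toList = pvMySplit [] s.toList := by
  have hb := PySem.Str.split?_map s "\n"
  have hc : PySem.Chars.split? s.toList "\n".toList = some (PySem.Chars.splitOn s.toList ['\n']) := by
    rw [show "\n".toList = ['\n'] by decide]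
    simp [PySem.Chars.split?]
  rw [hc] at hb
  cases h : PySem.Str.split? s "\n" with
  | none => rw [h] at hb; simp at hb
  | some ls =>
    rw [h] at hb
    simp only [Option.map_some, Option.some_inj] at hb
    simp [hb, pvSplitOn_eq]


theorem pvLinesB_toList (d : String) :
    (pvLinesB d).map String.toList = pvLB d.toList := by
  rw [pvLinesB, pvLB]
  simp only [PySem.Str.startswith_eq, PySem.Str.find_eq, PySem.Str.findFrom_eq,
    show "* out vec:".toList = pvM by decide,
    show ("\n* out vec:").toList = '\n' :: pvM by decide,
    show ("\n").toList = ['\n'] by decide]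
  rw [apply_ite (List.map String.toList), apply_ite (List.map String.toList)]
  simp only [List.map_nil]
  refine if_ctx_congr Iff.rfl (fun _ => rfl) (fun _ => ?_)
  refine if_ctx_congr Iff.rfl (fun _ => rfl) (fun hnl => ?_)
  rw [pvSplitLines]
  congr 1
  rw [PySem.Str.toList_slice, PySem.Chars.slice_eq_listSlice]
  rw [not_lt] at hnl
  exact PySem.List.slice_from _ (add_nonneg hnl zero_le_one)

theorem pvRest_toList (d : String) :
    ((((PySem.Str.split? d "\n").getD []).dropWhile
        (fun l => !PySem.Str.startswith l "* out vec:")).drop 1).map String.toList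
      = pvRA d.toList := by
  rw [pvRA, ← pvSplitLines d, List.dropWhile_map]
  rw [show ((fun l => !PySem.Chars.startswith l pvM) ∘ String.toList)
        = (fun l => !PySem.Str.startswith l "* out vec:") from by
    funext l
    simp [PySem.Str.startswith_eq, show "* out vec:".toList = pvM by decide]]
  rw [List.map_drop]

theorem pvLinesB_eq_rest (d : String) :
    pvLinesB d = (((PySem.Str.split? d "\n").getD []).dropWhile
        (fun l => !PySem.Str.startswith l "* out vec:")).drop 1 := by
  have h : (pvLinesB d).map String.toList =
      ((((PySem.Str.split? d "\n").getD []).dropWhile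
        (fun l => !PySem.Str.startswith l "* out vec:")).drop 1).map String.toList := by
    rw [pvLinesB_toList, pvRest_toList, pvMain]
  exact List.map_injective_iff.mpr (fun _ _ => String.toList_inj.mp) h

-- ===== VERDICT (by name: the statement is the Claim_ definition above) =====
theorem parse_profbval_spec : Claim_equal_parse_profbval := by
  intro d _ _
  unfold Spec_parse_profbval parse_profbval parse_profbval_alt
  simp only [pvFold_main, pvPairFold, pvLinesB_eq_rest, List.nil_append]
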